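-- pv_equiv track=rewrite | github.com/EmiOnGit/advent_of_code_23 | tag11/main.py | parse
-- ===== SOURCE A (Python) =====
-- def parse(input: str):
--     galaxies_x = []
--     galaxies_y = []
--     for row, line in enumerate(input.splitlines()):
--         for column, char in enumerate(line):
--             if char == '#':
--                 galaxies_x.append(column)
--                 galaxies_y.append(row)
--     galaxies_x.sort()
--     galaxies_y.sort()
--     return [galaxies_x, galaxies_y]
-- ===== SOURCE B (Python) =====
-- def parse(input: str):
--     lines = input.splitlines()
--     width = 0
--     for line in lines:
--         width = max(width, len(line))
--     galaxies_x = [c for c in range(width)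
--                   for line in lines
--                   if c < len(line) and line[c] == '#']
--     galaxies_y = [row for row, line in enumerate(lines) for ch in line if ch == '#']
--     return [galaxies_x, galaxies_y]
-- ===== Notes on version B (the rewrite author's own statement) =====
-- stated objective: alternative
-- what changed: Both sort calls are removed: galaxies_x is built by a column-major scan (columns emitted in increasing order) and galaxies_y by a row-major scan, so each traversal order yields the sorted multiset directly.
import Mathlib
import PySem

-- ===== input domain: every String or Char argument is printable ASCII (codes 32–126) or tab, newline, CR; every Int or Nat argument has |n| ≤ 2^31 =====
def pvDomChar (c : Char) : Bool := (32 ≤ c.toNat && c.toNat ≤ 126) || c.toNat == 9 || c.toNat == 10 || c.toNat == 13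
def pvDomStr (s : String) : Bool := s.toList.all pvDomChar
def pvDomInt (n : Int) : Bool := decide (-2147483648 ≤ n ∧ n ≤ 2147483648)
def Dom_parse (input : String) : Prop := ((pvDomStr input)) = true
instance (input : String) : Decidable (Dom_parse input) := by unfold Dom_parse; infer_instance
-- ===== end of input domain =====

-- B removes both sort calls: a column-major scan emits galaxy columns already in increasing
-- order and a row-major scan emits rows already in increasing order (objective: alternative).

-- ===== PORT A =====
def parse (input : String) : List (List Int) :=
  let st := (PySem.List.enumerate (PySem.Str.splitlines input) 0).foldl
    (fun (st : List Int × List Int) rl =>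
      (PySem.List.enumerate rl.2.toList 0).foldl
        (fun st cc => if cc.2 = '#' then (st.1 ++ [cc.1], st.2 ++ [rl.1]) else st) st)
    ([], [])
  [PySem.List.sorted st.1 (fun x => x) false, PySem.List.sorted st.2 (fun x => x) false]

-- ===== PORT B =====
-- getD's default ' ' is never read: the guard c < len(line) makes the index in range (c ≥ 0 from range).
def parse_alt (input : String) : List (List Int) :=
  let lines := PySem.Str.splitlines input
  let width : Int := lines.foldl (fun m l => max m (l.toList.length : Int)) 0
  let gx := (PySem.List.pyRange 0 width 1).flatMap (fun c =>
    lines.flatMap (fun l =>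
      if c < (l.toList.length : Int) ∧ l.toList.getD c.toNat ' ' = '#' then [c] else []))
  let gy := (PySem.List.enumerate lines 0).flatMap (fun rl =>
    rl.2.toList.flatMap (fun ch => if ch = '#' then [rl.1] else []))
  [gx, gy]

-- ===== PRECONDITION & SPEC =====
def Spec_parse (input : String) (out : List (List Int)) : Prop := out = parse_alt input
instance (input : String) (out : List (List Int)) : Decidable (Spec_parse input out) := by unfold Spec_parse; infer_instance

-- ===== CLAIM (what is proved, stated in full; the proofs are below) =====
def Claim_equal_parse : Prop := ∀ (input : String), Dom_parse input → Spec_parse input (parse input)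

-- ===== LEMMAS AND PROOFS =====

-- columns of the '#' cells of one line, indices starting at s
def colsF (s : Int) (l : List Char) : List Int :=
  (PySem.List.enumerate l s).flatMap (fun cc => if cc.2 = '#' then [cc.1] else [])

-- one copy of r per '#' cell of the line
def rowsF (r : Int) (l : List Char) : List Int :=
  l.flatMap (fun ch => if ch = '#' then [r] else [])

lemma colsF_cons (s : Int) (ch : Char) (t : List Char) :
    colsF s (ch :: t) = (if ch = '#' then [s] else []) ++ colsF (s+1) t := by
  simp [colsF, PySem.List.enumerate_cons]

lemma innerFold (r : Int) (l : List Char) (s : Int) (st : List Int × List Int) :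
    (PySem.List.enumerate l s).foldl
      (fun st (cc : Int × Char) => if cc.2 = '#' then (st.1 ++ [cc.1], st.2 ++ [r]) else st) st
    = (st.1 ++ colsF s l, st.2 ++ rowsF r l) := by
  induction l generalizing s st with
  | nil => simp [colsF, rowsF, PySem.List.enumerate_nil]
  | cons ch t ih =>
    rw [PySem.List.enumerate_cons, List.foldl_cons, ih, colsF_cons]
    by_cases h : ch = '#' <;> simp [h, rowsF]

lemma outerFold (rls : List (Int × String)) (st : List Int × List Int) :
    rls.foldl
      (fun (st : List Int × List Int) rl =>
        (PySem.List.enumerate rl.2.toList 0).foldl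
          (fun st (cc : Int × Char) => if cc.2 = '#' then (st.1 ++ [cc.1], st.2 ++ [rl.1]) else st) st) st
    = (st.1 ++ rls.flatMap (fun rl => colsF 0 rl.2.toList),
       st.2 ++ rls.flatMap (fun rl => rowsF rl.1 rl.2.toList)) := by
  induction rls generalizing st with
  | nil => simp
  | cons rl t ih => rw [List.foldl_cons, innerFold, ih]; simp

lemma flatMap_enumerate_snd {α β : Type} (f : α → List β) (xs : List α) (s : Int) :
    (PySem.List.enumerate xs s).flatMap (fun p => f p.2) = xs.flatMap f := by
  induction xs generalizing s with
  | nil => simp [PySem.List.enumerate_nil]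
  | cons x t ih => rw [PySem.List.enumerate_cons]; simp [ih]

-- generic: pairwise ≤ of a flatMap whose blocks are constant values given by a strictly
-- increasing-with-the-index function
lemma pairwise_le_flatMap {α : Type} (l : List α) (f : α → List Int) (v : α → Int)
    (hl : l.Pairwise (fun a b => v a < v b)) (hv : ∀ a ∈ l, ∀ x ∈ f a, x = v a) :
    (l.flatMap f).Pairwise (fun a b => a ≤ b) := by
  induction l with
  | nil => simp
  | cons a t ih =>
    rw [List.pairwise_cons] at hl
    simp only [List.flatMap_cons]
    apply (List.pairwise_append).mpr
    refine ⟨?_, ?_, ?_⟩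
    · exact List.pairwise_of_forall_mem_list (fun x hx y hy => by
        rw [hv a (by simp) x hx, hv a (by simp) y hy])
    · exact ih hl.2 (fun b hb x hx => hv b (by simp [hb]) x hx)
    · intro x hx y hy
      rcases List.mem_flatMap.mp hy with ⟨b, hb, hyb⟩
      rw [hv a (by simp) x hx, hv b (by simp [hb]) y hyb]
      exact le_of_lt (hl.1 b hb)

lemma gy_eq_sorted (lines : List String) :
    PySem.List.sorted
      ((PySem.List.enumerate lines 0).flatMap (fun rl => rowsF rl.1 rl.2.toList))
      (fun x => x) false
    = (PySem.List.enumerate lines 0).flatMap (fun rl => rowsF rl.1 rl.2.toList) := by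
  apply PySem.List.sorted_eq_self_of_pairwise
  apply pairwise_le_flatMap _ _ (fun rl => rl.1)
  · exact PySem.List.pairwise_lt_enumerate lines 0
  · intro a _ x hx
    simp only [rowsF, List.mem_flatMap] at hx
    rcases hx with ⟨ch, _, hx⟩
    split at hx <;> simp_all

-- count of a column c in one line's colsF
lemma count_colsF (l : List Char) (s c : Int) :
    (colsF s l).count c
    = (if s ≤ c ∧ c < s + l.length ∧ l.getD (c - s).toNat ' ' = '#' then 1 else 0) := by
  induction l generalizing s with
  | nil => simp [colsF, PySem.List.enumerate_nil]
  | cons ch t ih =>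
    rw [colsF_cons, List.count_append, ih (s+1)]
    by_cases hc : c = s
    · subst hc
      have hf : (if c + 1 ≤ c ∧ c < c + 1 + (t.length : Int) ∧ t.getD (c - (c+1)).toNat ' ' = '#'
          then 1 else 0) = 0 := by
        rw [if_neg]; rintro ⟨a, -, -⟩; omega
      rw [hf]
      have hidx : (c - c).toNat = 0 := by omega
      by_cases h : ch = '#'
      · have hcond : c ≤ c ∧ c < c + ((ch :: t).length : Int) ∧
            (ch :: t).getD (c - c).toNat ' ' = '#' :=
          ⟨le_refl c, by push_cast [List.length_cons]; omega, by simp [h]⟩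
        rw [if_pos hcond]; simp [h]
      · rw [if_neg (by rintro ⟨-, -, hp⟩; exact h (by simpa using hp))]
        simp [h]
    · have h1 : (if ch = '#' then [s] else []).count c = 0 := by
        by_cases h : ch = '#' <;> simp [h, List.count_singleton] <;> omega
      rw [h1, Nat.zero_add]
      by_cases hcs : s + 1 ≤ c
      · have hidx : (c - s).toNat = (c - (s+1)).toNat + 1 := by omega
        simp only [hidx, List.getD_cons_succ, List.length_cons]
        push_cast
        have hiff : (s + 1 ≤ c ∧ c < s + 1 + (t.length : Int) ∧ t.getD (c - (s+1)).toNat ' ' = '#')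
            ↔ (s ≤ c ∧ c < s + ((t.length : Int) + 1) ∧ t.getD (c - (s+1)).toNat ' ' = '#') := by
          constructor <;> rintro ⟨a, b, p⟩ <;> exact ⟨by omega, by omega, p⟩
        rw [if_congr hiff rfl rfl]
      · rw [if_neg (by rintro ⟨a, -, -⟩; omega), if_neg (by rintro ⟨a, -, -⟩; omega)]

lemma count_flatMap_eq_sum {α : Type} (l : List α) (f : α → List Int) (c : Int) :
    ((l.flatMap f).count c) = (l.map (fun x => (f x).count c)).sum := by
  induction l with
  | nil => simp
  | cons x t ih => simp [List.count_append, ih]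

lemma sum_map_ite_eq {l : List Int} (hn : l.Nodup) (c : Int) (K : Int → Nat) :
    (l.map (fun x => if c = x then K x else 0)).sum = if c ∈ l then K c else 0 := by
  induction l with
  | nil => simp
  | cons x t ih =>
    rw [List.nodup_cons] at hn
    by_cases h : c = x
    · subst h
      simp [ih hn.2, hn.1]
    · simp only [List.map_cons, List.sum_cons, if_neg h, ih hn.2, Nat.zero_add,
        List.mem_cons]
      simp [h]

lemma le_foldl_max (lines : List String) (a : Int) :
    a ≤ lines.foldl (fun m l => max m (l.toList.length : Int)) a := by
  induction lines generalizing a with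
  | nil => simp
  | cons x t ih => exact le_trans (le_max_left _ _) (ih _)

lemma mem_le_foldl_max (lines : List String) (a : Int) (l : String) (hl : l ∈ lines) :
    (l.toList.length : Int) ≤ lines.foldl (fun m l => max m (l.toList.length : Int)) a := by
  induction lines generalizing a with
  | nil => simp at hl
  | cons x t ih =>
    rcases List.mem_cons.mp hl with h | h
    · subst h; exact le_trans (le_max_right _ _) (le_foldl_max _ _)
    · exact ih _ h

lemma gx_eq (lines : List String) :
    PySem.List.sorted (lines.flatMap (fun l => colsF 0 l.toList)) (fun x => x) false
    = (PySem.List.pyRange 0 (lines.foldl (fun m l => max m (l.toList.length : Int)) 0) 1).flatMap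
        (fun c => lines.flatMap (fun l =>
          if c < (l.toList.length : Int) ∧ l.toList.getD c.toNat ' ' = '#' then [c] else [])) := by
  set width := lines.foldl (fun m l => max m (l.toList.length : Int)) 0 with hw
  apply PySem.List.sorted_id_eq_of_perm_of_pairwise
  · -- the column-major list is a permutation of the row-major one: equal counts
    apply (List.perm_iff_count).mpr
    intro c
    rw [count_flatMap_eq_sum, count_flatMap_eq_sum]
    have hblock : ∀ c' ∈ PySem.List.pyRange 0 width 1,
        (lines.flatMap (fun l =>
          if c' < (l.toList.length : Int) ∧ l.toList.getD c'.toNat ' ' = '#' then [c'] else [])).count c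
        = if c = c' then
            (lines.map (fun l =>
              if c < (l.toList.length : Int) ∧ l.toList.getD c.toNat ' ' = '#' then 1 else 0)).sum
          else 0 := by
      intro c' _
      rw [count_flatMap_eq_sum]
      by_cases h : c = c'
      · subst h
        rw [if_pos rfl]
        congr 1
        apply List.map_congr_left
        intro l _
        split_ifs with hg <;> simp
      · rw [if_neg h]
        have hz : ∀ l ∈ lines, (List.count c
            (if c' < (l.toList.length : Int) ∧ l.toList.getD c'.toNat ' ' = '#'
              then [c'] else [])) = 0 := by
          intro l _
          split_ifs with hg
          · rw [List.count_eq_zero]; simp [h]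
          · simp
        rw [List.map_congr_left hz]
        simp
    rw [List.map_congr_left hblock, sum_map_ite_eq (PySem.List.nodup_pyRange_one 0 width) c]
    simp only [PySem.List.mem_pyRange_one]
    have hcols : ∀ l ∈ lines, (colsF 0 l.toList).count c
        = if 0 ≤ c ∧ c < (l.toList.length : Int) ∧ l.toList.getD c.toNat ' ' = '#'
          then 1 else 0 := by
      intro l _
      rw [count_colsF]
      simp
    rw [List.map_congr_left hcols]
    by_cases h0 : 0 ≤ c
    · by_cases hwc : c < width
      · rw [if_pos ⟨h0, hwc⟩]
        congr 1
        apply List.map_congr_left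
        intro l _
        by_cases hg : c < (l.toList.length : Int) ∧ l.toList.getD c.toNat ' ' = '#'
        · rw [if_pos hg, if_pos ⟨h0, hg.1, hg.2⟩]
        · rw [if_neg hg, if_neg (by rintro ⟨-, a, b⟩; exact hg ⟨a, b⟩)]
      · rw [if_neg (by rintro ⟨-, hh⟩; omega)]
        have : ∀ l ∈ lines,
            (if 0 ≤ c ∧ c < (l.toList.length : Int) ∧ l.toList.getD c.toNat ' ' = '#'
              then 1 else 0) = 0 := by
          intro l hl
          have := mem_le_foldl_max lines 0 l hl
          rw [if_neg]; rintro ⟨-, a, -⟩; omega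
        rw [List.map_congr_left this]
        simp
    · rw [if_neg (by rintro ⟨a, -⟩; omega)]
      have : ∀ l ∈ lines,
          (if 0 ≤ c ∧ c < (l.toList.length : Int) ∧ l.toList.getD c.toNat ' ' = '#'
            then 1 else 0) = 0 := by
        intro l hl
        rw [if_neg]; rintro ⟨a, -⟩; omega
      rw [List.map_congr_left this]
      simp
  · -- column-major emission is nondecreasing
    apply pairwise_le_flatMap _ _ (fun c => c)
    · exact PySem.List.pairwise_lt_pyRange_one 0 (lines.foldl (fun m l => max m (l.toList.length : Int)) 0)
    · intro c _ x hx
      rcases List.mem_flatMap.mp hx with ⟨l, _, hxl⟩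
      split at hxl <;> simp_all

-- ===== VERDICT (by name: the statement is the Claim_ definition above) =====
theorem parse_spec : Claim_equal_parse := by
  intro input _
  unfold Spec_parse parse parse_alt
  simp only [outerFold]
  rw [flatMap_enumerate_snd (fun s => colsF 0 s.toList) (PySem.Str.splitlines input) 0]
  rw [List.nil_append, List.nil_append]
  rw [gx_eq, gy_eq_sorted]
  simp only [rowsF]
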